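-- pv_equiv track=rewrite | github.com/Phulpps/Optode-and-Data-Analysis | Watershed_method.py | cartesian_coords_extraction
-- ===== SOURCE A (Python) =====
-- def cartesian_coords_extraction(sorted_cnts, no_to_extract):
--     list_of_coords = []
--     count = 0
--     while count < no_to_extract:
--         #for idx, each_cnt in enumerate(sorted_conts):
--         x_coords = [coord_pair[0][0] for coord_pair in sorted_cnts[count]]
--         y_coords = [coord_pair[0][1] for coord_pair in sorted_cnts[count]]
--         list_of_coords.append([x_coords, y_coords])
--         count += 1
--     return list_of_coords
-- ===== SOURCE B (Python) =====
-- def cartesian_coords_extraction(sorted_cnts, no_to_extract):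
--     result = []
--     for i in range(no_to_extract):
--         pairs = [coord_pair[0] for coord_pair in sorted_cnts[i]]
--         if pairs:
--             cols = list(zip(*pairs))
--             result.append([list(cols[0]), list(cols[1])])
--         else:
--             result.append([[], []])
--     return result
-- ===== Notes on version B (the rewrite author's own statement) =====
-- stated objective: idiomatic
-- what changed: B collects each contour's first points once and transposes them in a single zip(*pairs) step, reading off the x and y columns, instead of A's two separate field-extraction comprehension passes driven by an index-counting while loop.
import Mathlib
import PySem

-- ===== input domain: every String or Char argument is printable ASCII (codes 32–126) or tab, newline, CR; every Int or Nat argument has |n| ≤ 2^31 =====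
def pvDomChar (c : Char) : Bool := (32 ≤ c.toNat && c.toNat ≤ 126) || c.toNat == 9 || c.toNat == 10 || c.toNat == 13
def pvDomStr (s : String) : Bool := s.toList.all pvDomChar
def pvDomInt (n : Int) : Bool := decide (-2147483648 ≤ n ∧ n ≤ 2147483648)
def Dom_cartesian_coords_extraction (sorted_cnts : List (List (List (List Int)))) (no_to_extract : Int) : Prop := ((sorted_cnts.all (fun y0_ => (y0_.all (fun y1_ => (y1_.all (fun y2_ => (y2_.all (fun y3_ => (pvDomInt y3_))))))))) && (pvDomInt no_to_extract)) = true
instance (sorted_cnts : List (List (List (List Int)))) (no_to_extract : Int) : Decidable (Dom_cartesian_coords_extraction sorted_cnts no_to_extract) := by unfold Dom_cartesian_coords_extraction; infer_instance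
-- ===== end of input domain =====

-- B collects each contour's first points once and transposes them with a zip(*pairs) step
-- (reading off the x and y columns), replacing A's two field-extraction comprehensions
-- per contour driven by an index-counting while loop ("idiomatic").


-- ===== PORT A =====
-- coord_pair[0][j] with Python indexing; the .getD defaults are never reached inside Pre_
def pvCoord (j : Int) (coord_pair : List (List Int)) : Int :=
  (PySem.List.pyGet? ((PySem.List.pyGet? coord_pair 0).getD []) j).getD 0

-- while count < no_to_extract: two comprehensions over sorted_cnts[count], append, count += 1
def cartesian_coords_extraction (sorted_cnts : List (List (List (List Int)))) (no_to_extract : Int) : List (List (List Int)) :=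
  (List.range no_to_extract.toNat).foldl
    (fun list_of_coords (count : Nat) =>
      let contour := (PySem.List.pyGet? sorted_cnts ((count : Nat) : Int)).getD []
      let x_coords := contour.map (pvCoord 0)
      let y_coords := contour.map (pvCoord 1)
      list_of_coords ++ [[x_coords, y_coords]])
    []

-- ===== PORT B =====
-- zip(*pairs): transpose truncating at the shortest row (empty if any row is empty)
def pvZipStar (ls : List (List Int)) : List (List Int) :=
  match ls with
  | [] => []
  | l :: rest =>
    if (l :: rest).any (·.isEmpty) then []
    else ((l :: rest).map (·.headD 0)) :: pvZipStar ((l :: rest).map List.tail)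
termination_by (ls.headD []).length
decreasing_by
  rename_i h
  simp only [List.any_cons, Bool.or_eq_true, List.isEmpty_iff] at h
  cases l with
  | nil => exact absurd rfl (fun hh => h (Or.inl hh))
  | cons a t => simp

-- for i in range(no_to_extract): pairs = [cp[0] ...]; cols = zip(*pairs); take cols[0], cols[1]
def cartesian_coords_extraction_alt (sorted_cnts : List (List (List (List Int)))) (no_to_extract : Int) : List (List (List Int)) :=
  (List.range no_to_extract.toNat).foldl
    (fun result (i : Nat) =>
      let contour := (PySem.List.pyGet? sorted_cnts ((i : Nat) : Int)).getD []
      let pairs := contour.map (fun cp => (PySem.List.pyGet? cp 0).getD [])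
      result ++
        [if pairs.isEmpty then [[], []]
         else
           let cols := pvZipStar pairs
           [(PySem.List.pyGet? cols 0).getD [], (PySem.List.pyGet? cols 1).getD []]])
    []

-- ===== PRECONDITION & SPEC =====
-- Pre_ = exactly where Python A returns: no_to_extract ≤ len(sorted_cnts) (else sorted_cnts[count]
-- raises IndexError) and in the first no_to_extract contours every coord_pair is nonempty with a
-- first point of length ≥ 2 (else coord_pair[0][0]/[1] raises IndexError).
def Pre_cartesian_coords_extraction (sorted_cnts : List (List (List (List Int)))) (no_to_extract : Int) : Prop :=
  no_to_extract ≤ (sorted_cnts.length : Int) ∧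
  ∀ contour ∈ sorted_cnts.take no_to_extract.toNat,
    ∀ coord_pair ∈ contour, coord_pair ≠ [] ∧ 2 ≤ (coord_pair.headD []).length
instance (sorted_cnts : List (List (List (List Int)))) (no_to_extract : Int) : Decidable (Pre_cartesian_coords_extraction sorted_cnts no_to_extract) := by unfold Pre_cartesian_coords_extraction; infer_instance

def pvWitness_cartesian_coords_extraction : List (List (List (List Int))) × Int :=
  ([[[[1, 2]], [[3, 4]]], [[[5, 6]]]], 2)

def Spec_cartesian_coords_extraction (sorted_cnts : List (List (List (List Int)))) (no_to_extract : Int) (out : List (List (List Int))) : Prop := out = cartesian_coords_extraction_alt sorted_cnts no_to_extract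
instance (sorted_cnts : List (List (List (List Int)))) (no_to_extract : Int) (out : List (List (List Int))) : Decidable (Spec_cartesian_coords_extraction sorted_cnts no_to_extract out) := by unfold Spec_cartesian_coords_extraction; infer_instance

-- ===== CLAIM (what is proved, stated in full; the proofs are below) =====
def Claim_equal_cartesian_coords_extraction : Prop := ∀ (sorted_cnts : List (List (List (List Int)))) (no_to_extract : Int), Dom_cartesian_coords_extraction sorted_cnts no_to_extract → Pre_cartesian_coords_extraction sorted_cnts no_to_extract → Spec_cartesian_coords_extraction sorted_cnts no_to_extract (cartesian_coords_extraction sorted_cnts no_to_extract)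

-- ===== LEMMAS AND PROOFS =====

-- the common specification value per contour
def pvSpecF (contour : List (List (List Int))) : List (List Int) :=
  [contour.map (pvCoord 0), contour.map (pvCoord 1)]

-- the per-contour condition Pre_ imposes
def pvOkC (contour : List (List (List Int))) : Prop :=
  ∀ coord_pair ∈ contour, coord_pair ≠ [] ∧ 2 ≤ (coord_pair.headD []).length

-- on rows of length ≥ 2, two unfoldings of the transpose expose its first two columns
lemma pvZipStar_cons (ls : List (List Int)) (hne : ls ≠ [])
    (h : ∀ q ∈ ls, q.isEmpty = false) :
    pvZipStar ls = ls.map (·.headD 0) :: pvZipStar (ls.map List.tail) := by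
  obtain ⟨l, t, rfl⟩ := List.exists_cons_of_ne_nil hne
  have hany : ((l :: t).any (·.isEmpty)) = false := by
    simp only [List.any_eq_false]
    exact fun p hp => by simpa using h p hp
  rw [pvZipStar, if_neg (by simp [hany])]

lemma pvZip_two (pairs : List (List Int)) (hne : pairs ≠ [])
    (h : ∀ p ∈ pairs, 2 ≤ p.length) :
    ∃ rest, pvZipStar pairs =
      (pairs.map (·.headD 0)) :: (pairs.map (fun p => p.tail.headD 0)) :: rest := by
  have h1 : ∀ q ∈ pairs, q.isEmpty = false := by
    intro p hp
    have := h p hp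
    cases p <;> simp_all
  have h2 : ∀ q ∈ pairs.map List.tail, q.isEmpty = false := by
    simp only [List.mem_map]
    rintro q ⟨p, hp, rfl⟩
    have := h p hp
    cases p with
    | nil => simp_all
    | cons a t => cases t <;> simp_all
  have hne2 : pairs.map List.tail ≠ [] := by simp [hne]
  rw [pvZipStar_cons pairs hne h1, pvZipStar_cons _ hne2 h2]
  exact ⟨_, by rw [List.map_map]; rfl⟩

-- B's branch per contour equals the spec value
lemma pvPer_eq (contour : List (List (List Int))) (h : pvOkC contour) :
    (let pairs := contour.map (fun cp => (PySem.List.pyGet? cp 0).getD [])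
     if pairs.isEmpty then [[], []]
     else
       let cols := pvZipStar pairs
       [(PySem.List.pyGet? cols 0).getD [], (PySem.List.pyGet? cols 1).getD []])
    = pvSpecF contour := by
  have hpair : ∀ cp ∈ contour, (PySem.List.pyGet? cp 0).getD [] = cp.headD [] := by
    intro cp hcp
    have := (h cp hcp).1
    cases cp <;> simp_all [PySem.List.pyGet?, PySem.List.pyIdx?]
  have hhead : ∀ cp ∈ contour, ∃ a b t, cp.headD [] = a :: b :: t := by
    intro cp hcp
    have h2 := (h cp hcp).2
    cases hd : cp.headD [] with
    | nil => rw [hd] at h2; simp at h2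
    | cons a t =>
      cases t with
      | nil => rw [hd] at h2; simp at h2
      | cons b t' => exact ⟨a, b, t', rfl⟩
  cases hc : contour with
  | nil => simp [pvSpecF]
  | cons c cs =>
    subst hc
    have hne : (c :: cs).map (fun cp => (PySem.List.pyGet? cp 0).getD []) ≠ [] := by simp
    have hlen : ∀ p ∈ (c :: cs).map (fun cp => (PySem.List.pyGet? cp 0).getD []), 2 ≤ p.length := by
      rintro p hp
      simp only [List.mem_map] at hp
      obtain ⟨cp, hcp, rfl⟩ := hp
      rw [hpair cp hcp]
      obtain ⟨a, b, t, hd⟩ := hhead cp hcp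
      rw [hd]; simp
    obtain ⟨rest, hz⟩ := pvZip_two _ hne hlen
    have hie : ((c :: cs).map (fun cp => (PySem.List.pyGet? cp 0).getD [])).isEmpty = false := by simp
    simp only [hie, Bool.false_eq_true, if_false, hz]
    have hx : ((c :: cs).map (fun cp => (PySem.List.pyGet? cp 0).getD [])).map (·.headD 0)
        = (c :: cs).map (pvCoord 0) := by
      rw [List.map_map]
      refine List.map_congr_left ?_
      intro cp hcp
      obtain ⟨a, b, t, hd⟩ := hhead cp hcp
      show ((PySem.List.pyGet? cp 0).getD []).headD 0 = pvCoord 0 cp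
      rw [pvCoord, hpair cp hcp, hd]
      simp [PySem.List.pyGet?, PySem.List.pyIdx?,
            show (0:Int) ≤ (t.length:Int) + 1 from by positivity]
    have hy : ((c :: cs).map (fun cp => (PySem.List.pyGet? cp 0).getD [])).map (fun p => p.tail.headD 0)
        = (c :: cs).map (pvCoord 1) := by
      rw [List.map_map]
      refine List.map_congr_left ?_
      intro cp hcp
      obtain ⟨a, b, t, hd⟩ := hhead cp hcp
      show ((PySem.List.pyGet? cp 0).getD []).tail.headD 0 = pvCoord 1 cp
      rw [pvCoord, hpair cp hcp, hd]
      simp [PySem.List.pyGet?, PySem.List.pyIdx?]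
    have g0 : ∀ (x y : List Int) (r : List (List Int)),
        (PySem.List.pyGet? (x :: y :: r) (0 : Int)).getD [] = x := by
      intro x y r
      rw [PySem.List.pyGet?_zero_cons]
      rfl
    have g1 : ∀ (x y : List Int) (r : List (List Int)),
        (PySem.List.pyGet? (x :: y :: r) (1 : Int)).getD [] = y := by
      intro x y r
      rw [show (1 : Int) = ((1 : Nat) : Int) from rfl, PySem.List.pyGet?_natCast]
      rfl
    rw [g0, g1, hx, hy, pvSpecF]

-- A equals map ∘ take when the index stays in range
lemma pvA_eq (cnts : List (List (List (List Int)))) (k : Nat) (hk : k ≤ cnts.length) :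
    (List.range k).foldl
      (fun acc (count : Nat) =>
        let contour := (PySem.List.pyGet? cnts ((count : Nat) : Int)).getD []
        acc ++ [[contour.map (pvCoord 0), contour.map (pvCoord 1)]])
      []
    = (cnts.take k).map pvSpecF := by
  induction k with
  | zero => simp
  | succ n ih =>
    have hn : n ≤ cnts.length := by omega
    have hlt : n < cnts.length := by omega
    rw [List.range_succ, List.foldl_append, ih hn]
    simp only [List.foldl_cons, List.foldl_nil, PySem.List.pyGet?_natCast,
               List.getElem?_eq_getElem hlt, Option.getD_some,
               List.take_add_one, List.map_append]
    simp [pvSpecF]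

-- B equals map ∘ take under the per-contour Pre_ condition
lemma pvB_eq (cnts : List (List (List (List Int)))) (k : Nat) (hk : k ≤ cnts.length)
    (hc : ∀ c ∈ cnts.take k, pvOkC c) :
    (List.range k).foldl
      (fun result (i : Nat) =>
        let contour := (PySem.List.pyGet? cnts ((i : Nat) : Int)).getD []
        let pairs := contour.map (fun cp => (PySem.List.pyGet? cp 0).getD [])
        result ++
          [if pairs.isEmpty then [[], []]
           else
             let cols := pvZipStar pairs
             [(PySem.List.pyGet? cols 0).getD [], (PySem.List.pyGet? cols 1).getD []]])
      []
    = (cnts.take k).map pvSpecF := by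
  induction k with
  | zero => simp
  | succ n ih =>
    have hn : n ≤ cnts.length := by omega
    have hlt : n < cnts.length := by omega
    have hc' : ∀ c ∈ cnts.take n, pvOkC c := by
      intro c hm
      refine hc c ?_
      have : cnts.take n = (cnts.take (n+1)).take n := by simp [List.take_take]
      rw [this] at hm
      exact List.mem_of_mem_take hm
    have hmem : cnts[n] ∈ cnts.take (n + 1) := by
      have : (cnts.take (n+1))[n]'(by simp; omega) = cnts[n] := List.getElem_take
      rw [← this]
      exact List.getElem_mem _
    rw [List.range_succ, List.foldl_append, ih hn hc']
    simp only [List.foldl_cons, List.foldl_nil, PySem.List.pyGet?_natCast,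
               List.getElem?_eq_getElem hlt, Option.getD_some,
               List.take_add_one, List.map_append]
    congr 1
    simpa using pvPer_eq _ (hc _ hmem)

-- ===== VERDICT (by name: the statement is the Claim_ definition above) =====
theorem cartesian_coords_extraction_spec : Claim_equal_cartesian_coords_extraction := by
  intro cnts n _ hpre
  unfold Spec_cartesian_coords_extraction cartesian_coords_extraction cartesian_coords_extraction_alt
  have hk : n.toNat ≤ cnts.length := by
    have := hpre.1; omega
  rw [pvB_eq cnts n.toNat hk hpre.2]
  exact pvA_eq cnts n.toNat hk
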